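-- pv_equiv track=rewrite | github.com/cihaneray/python-port-scanner | modules/os_fingerprinter.py | _same_os_family
-- ===== SOURCE A (Python) =====
-- def _same_os_family(os1: str, os2: str) -> bool:
--     """Check if two OS strings belong to the same OS family."""
--     os1_lower = os1.lower()
--     os2_lower = os2.lower()
--
--     # Define OS families
--     linux_terms = ["linux", "ubuntu", "debian", "centos", "rhel", "fedora", "red hat"]
--     windows_terms = ["windows", "microsoft", "win"]
--     bsd_terms = ["bsd", "freebsd", "openbsd", "netbsd"]
--     mac_terms = ["mac", "macos", "os x", "darwin"]
--
--     # Check if both belong to the same family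
--     for terms in [linux_terms, windows_terms, bsd_terms, mac_terms]:
--         if any(term in os1_lower for term in terms) and any(term in os2_lower for term in terms):
--             return True
--
--     return False
-- ===== SOURCE B (Python) =====
-- # Flat keyword->bitmask table (redundant terms dropped: every "*bsd" contains "bsd",
-- # "windows" contains "win", "macos" contains "mac"); one mask per string, then AND.
-- _TERM_BITS = [
--     ("linux", 1), ("ubuntu", 1), ("debian", 1), ("centos", 1),
--     ("rhel", 1), ("fedora", 1), ("red hat", 1),
--     ("win", 2), ("microsoft", 2),
--     ("bsd", 4),
--     ("mac", 8), ("os x", 8), ("darwin", 8),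
-- ]
--
--
-- def _same_os_family(os1: str, os2: str) -> bool:
--     """Check if two OS strings belong to the same OS family."""
--     def mask(s: str) -> int:
--         s = s.lower()
--         m = 0
--         for term, bit in _TERM_BITS:
--             if term in s:
--                 m |= bit
--         return m
--
--     return mask(os1) & mask(os2) != 0
-- ===== Notes on version B (the rewrite author's own statement) =====
-- stated objective: alternative
-- what changed: Replaces the nested per-family double-any loop with a flat keyword-to-bitmask table (pruned of terms made redundant by substring absorption, e.g. 'freebsd' implies 'bsd'), computing one family bitmask per string and testing the bitwise AND.
import Mathlib
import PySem

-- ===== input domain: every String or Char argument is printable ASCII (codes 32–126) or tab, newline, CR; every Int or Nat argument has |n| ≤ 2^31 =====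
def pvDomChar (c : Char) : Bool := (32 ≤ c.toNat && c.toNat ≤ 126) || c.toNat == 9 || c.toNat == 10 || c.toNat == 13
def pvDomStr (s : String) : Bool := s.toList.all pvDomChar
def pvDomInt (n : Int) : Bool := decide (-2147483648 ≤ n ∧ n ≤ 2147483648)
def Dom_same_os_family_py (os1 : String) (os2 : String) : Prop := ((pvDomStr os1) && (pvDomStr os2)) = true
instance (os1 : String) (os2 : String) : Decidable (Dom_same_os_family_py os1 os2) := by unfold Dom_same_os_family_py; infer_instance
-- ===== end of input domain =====

-- B replaces the nested per-family double-any loop with a flat pruned keyword->bitmask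
-- table (substring-absorbed terms dropped), one mask per string, then a bitwise AND test.


-- ===== PORT A =====
def pvCheckFamilies (o1 o2 : String) : List (List String) → Bool
  | [] => false
  | terms :: rest =>
    if (terms.any (fun t => PySem.Str.isIn t o1)) && (terms.any (fun t => PySem.Str.isIn t o2)) then
      true
    else
      pvCheckFamilies o1 o2 rest

def same_os_family_py (os1 : String) (os2 : String) : Bool :=
  pvCheckFamilies (PySem.Str.lower os1) (PySem.Str.lower os2)
    [["linux", "ubuntu", "debian", "centos", "rhel", "fedora", "red hat"],
     ["windows", "microsoft", "win"],
     ["bsd", "freebsd", "openbsd", "netbsd"],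
     ["mac", "macos", "os x", "darwin"]]

-- ===== PORT B =====
def pvTermBits : List (String × Nat) :=
  [("linux", 1), ("ubuntu", 1), ("debian", 1), ("centos", 1),
   ("rhel", 1), ("fedora", 1), ("red hat", 1),
   ("win", 2), ("microsoft", 2),
   ("bsd", 4),
   ("mac", 8), ("os x", 8), ("darwin", 8)]

def pvStep (t : String) (m : Nat) (p : String × Nat) : Nat :=
  if PySem.Str.isIn p.1 t then m ||| p.2 else m

def pvMask (s : String) : Nat :=
  pvTermBits.foldl (pvStep (PySem.Str.lower s)) 0

def same_os_family_py_alt (os1 : String) (os2 : String) : Bool :=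
  decide (pvMask os1 &&& pvMask os2 ≠ 0)

-- ===== PRECONDITION & SPEC =====
def Spec_same_os_family_py (os1 : String) (os2 : String) (out : Bool) : Prop := out = same_os_family_py_alt os1 os2
instance (os1 : String) (os2 : String) (out : Bool) : Decidable (Spec_same_os_family_py os1 os2 out) := by unfold Spec_same_os_family_py; infer_instance

-- ===== CLAIM (what is proved, stated in full; the proofs are below) =====
def Claim_equal_same_os_family_py : Prop := ∀ (os1 : String) (os2 : String), Dom_same_os_family_py os1 os2 → Spec_same_os_family_py os1 os2 (same_os_family_py os1 os2)

-- ===== LEMMAS AND PROOFS =====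

-- substring absorption: if t1 is a substring of t2, then "t2 in s" implies "t1 in s"
theorem pvAbsorb {t1 t2 : String} (h : t1.toList <:+: t2.toList) (s : String)
    (h2 : PySem.Str.isIn t2 s = true) : PySem.Str.isIn t1 s = true := by
  rw [PySem.Str.isIn_iff_infix] at h2 ⊢
  exact h.trans h2

theorem pvAnyWin (t : String) :
    (["windows", "microsoft", "win"] : List String).any (fun x => PySem.Str.isIn x t)
      = (PySem.Str.isIn "win" t || PySem.Str.isIn "microsoft" t) := by
  simp only [List.any_cons, List.any_nil, Bool.or_false]
  cases hw : PySem.Str.isIn "windows" t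
  · rw [Bool.false_or]; exact Bool.or_comm _ _
  · rw [pvAbsorb (t1 := "win") (t2 := "windows") (by decide) t hw]
    simp only [Bool.true_or, Bool.or_true]

theorem pvAnyBsd (t : String) :
    (["bsd", "freebsd", "openbsd", "netbsd"] : List String).any (fun x => PySem.Str.isIn x t)
      = PySem.Str.isIn "bsd" t := by
  simp only [List.any_cons, List.any_nil, Bool.or_false]
  cases hb : PySem.Str.isIn "bsd" t
  · have h1 : PySem.Str.isIn "freebsd" t = false := by
      cases h : PySem.Str.isIn "freebsd" t
      · rfl
      · rw [pvAbsorb (t1 := "bsd") (t2 := "freebsd") (by decide) t h] at hb; exact hb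
    have h2 : PySem.Str.isIn "openbsd" t = false := by
      cases h : PySem.Str.isIn "openbsd" t
      · rfl
      · rw [pvAbsorb (t1 := "bsd") (t2 := "openbsd") (by decide) t h] at hb; exact hb
    have h3 : PySem.Str.isIn "netbsd" t = false := by
      cases h : PySem.Str.isIn "netbsd" t
      · rfl
      · rw [pvAbsorb (t1 := "bsd") (t2 := "netbsd") (by decide) t h] at hb; exact hb
    rw [h1, h2, h3]; rfl
  · rw [Bool.true_or]

theorem pvAnyMac (t : String) :
    (["mac", "macos", "os x", "darwin"] : List String).any (fun x => PySem.Str.isIn x t)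
      = (PySem.Str.isIn "mac" t || PySem.Str.isIn "os x" t || PySem.Str.isIn "darwin" t) := by
  simp only [List.any_cons, List.any_nil, Bool.or_false]
  cases hm : PySem.Str.isIn "mac" t
  · have h1 : PySem.Str.isIn "macos" t = false := by
      cases h : PySem.Str.isIn "macos" t
      · rfl
      · rw [pvAbsorb (t1 := "mac") (t2 := "macos") (by decide) t h] at hm; exact hm
    rw [h1, Bool.false_or, Bool.false_or, Bool.or_assoc, Bool.false_or]
  · rw [Bool.true_or, Bool.true_or, Bool.true_or]

-- pulling the accumulator out of the bitmask fold
theorem pvFoldl_or (t : String) (l : List (String × Nat)) (m : Nat) :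
    l.foldl (pvStep t) m = m ||| l.foldl (pvStep t) 0 := by
  induction l generalizing m with
  | nil => simp [List.foldl_nil, Nat.or_zero]
  | cons p l ih =>
    simp only [List.foldl_cons, pvStep]
    split
    · rw [ih (m ||| p.2), ih (0 ||| p.2), Nat.zero_or, Nat.or_assoc]
    · exact ih m

theorem pvMaskLinux (t : String) :
    ([("linux", 1), ("ubuntu", 1), ("debian", 1), ("centos", 1), ("rhel", 1), ("fedora", 1),
      ("red hat", 1)] : List (String × Nat)).foldl (pvStep t) 0
      = if (["linux", "ubuntu", "debian", "centos", "rhel", "fedora", "red hat"] : List String).any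
            (fun x => PySem.Str.isIn x t) then 1 else 0 := by
  simp only [List.foldl, pvStep, List.any_cons, List.any_nil, Bool.or_false]
  generalize PySem.Str.isIn "linux" t = a1
  generalize PySem.Str.isIn "ubuntu" t = a2
  generalize PySem.Str.isIn "debian" t = a3
  generalize PySem.Str.isIn "centos" t = a4
  generalize PySem.Str.isIn "rhel" t = a5
  generalize PySem.Str.isIn "fedora" t = a6
  generalize PySem.Str.isIn "red hat" t = a7
  revert a1 a2 a3 a4 a5 a6 a7
  decide

theorem pvMaskWin (t : String) :
    ([("win", 2), ("microsoft", 2)] : List (String × Nat)).foldl (pvStep t) 0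
      = if (PySem.Str.isIn "win" t || PySem.Str.isIn "microsoft" t) then 2 else 0 := by
  simp only [List.foldl, pvStep]
  generalize PySem.Str.isIn "win" t = b1
  generalize PySem.Str.isIn "microsoft" t = b2
  revert b1 b2
  decide

theorem pvMaskBsd (t : String) :
    ([("bsd", 4)] : List (String × Nat)).foldl (pvStep t) 0
      = if PySem.Str.isIn "bsd" t then 4 else 0 := by
  simp only [List.foldl, pvStep]
  generalize PySem.Str.isIn "bsd" t = c1
  revert c1
  decide

theorem pvMaskMac (t : String) :
    ([("mac", 8), ("os x", 8), ("darwin", 8)] : List (String × Nat)).foldl (pvStep t) 0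
      = if (PySem.Str.isIn "mac" t || PySem.Str.isIn "os x" t || PySem.Str.isIn "darwin" t)
          then 8 else 0 := by
  simp only [List.foldl, pvStep]
  generalize PySem.Str.isIn "mac" t = d1
  generalize PySem.Str.isIn "os x" t = d2
  generalize PySem.Str.isIn "darwin" t = d3
  revert d1 d2 d3
  decide

theorem pvMask_eq (s : String) :
    pvMask s =
      ((if (["linux", "ubuntu", "debian", "centos", "rhel", "fedora", "red hat"] : List String).any
            (fun x => PySem.Str.isIn x (PySem.Str.lower s)) then 1 else 0) |||
       (if (PySem.Str.isIn "win" (PySem.Str.lower s) || PySem.Str.isIn "microsoft" (PySem.Str.lower s)) then 2 else 0) |||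
       (if PySem.Str.isIn "bsd" (PySem.Str.lower s) then 4 else 0) |||
       (if (PySem.Str.isIn "mac" (PySem.Str.lower s) || PySem.Str.isIn "os x" (PySem.Str.lower s) ||
            PySem.Str.isIn "darwin" (PySem.Str.lower s)) then 8 else 0)) := by
  have hsplit : pvTermBits =
      ([("linux", 1), ("ubuntu", 1), ("debian", 1), ("centos", 1), ("rhel", 1), ("fedora", 1),
        ("red hat", 1)] : List (String × Nat))
      ++ [("win", 2), ("microsoft", 2)] ++ [("bsd", 4)] ++ [("mac", 8), ("os x", 8), ("darwin", 8)] := by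
    rfl
  unfold pvMask
  rw [hsplit, List.foldl_append, List.foldl_append, List.foldl_append,
    pvFoldl_or _ _ (List.foldl _ _ _), pvFoldl_or _ _ (List.foldl _ _ _),
    pvFoldl_or _ _ (List.foldl _ _ _),
    pvMaskLinux, pvMaskWin, pvMaskBsd, pvMaskMac]

-- ===== VERDICT (by name: the statement is the Claim_ definition above) =====
theorem same_os_family_py_spec : Claim_equal_same_os_family_py := by
  intro os1 os2 _
  unfold Spec_same_os_family_py same_os_family_py same_os_family_py_alt
  rw [pvMask_eq os1, pvMask_eq os2]
  simp only [pvCheckFamilies]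
  rw [pvAnyWin, pvAnyWin, pvAnyBsd, pvAnyBsd, pvAnyMac, pvAnyMac]
  generalize (["linux", "ubuntu", "debian", "centos", "rhel", "fedora", "red hat"] : List String).any
      (fun x => PySem.Str.isIn x (PySem.Str.lower os1)) = L1
  generalize (["linux", "ubuntu", "debian", "centos", "rhel", "fedora", "red hat"] : List String).any
      (fun x => PySem.Str.isIn x (PySem.Str.lower os2)) = L2
  generalize (PySem.Str.isIn "win" (PySem.Str.lower os1) || PySem.Str.isIn "microsoft" (PySem.Str.lower os1)) = W1
  generalize (PySem.Str.isIn "win" (PySem.Str.lower os2) || PySem.Str.isIn "microsoft" (PySem.Str.lower os2)) = W2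
  generalize PySem.Str.isIn "bsd" (PySem.Str.lower os1) = B1
  generalize PySem.Str.isIn "bsd" (PySem.Str.lower os2) = B2
  generalize (PySem.Str.isIn "mac" (PySem.Str.lower os1) || PySem.Str.isIn "os x" (PySem.Str.lower os1) ||
      PySem.Str.isIn "darwin" (PySem.Str.lower os1)) = M1
  generalize (PySem.Str.isIn "mac" (PySem.Str.lower os2) || PySem.Str.isIn "os x" (PySem.Str.lower os2) ||
      PySem.Str.isIn "darwin" (PySem.Str.lower os2)) = M2
  revert L1 L2 W1 W2 B1 B2 M1 M2
  decide
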